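-- pv_equiv track=rewrite | github.com/techniciandev93/secret-santa | telegram_bot/services.py | separate_players
-- ===== SOURCE A (Python) =====
-- def generator_separated_users(users):
--     while True:
--         for user in users:
--             yield user
--
-- def get_user(gen_user, user, separated_users):
--     while True:
--         next_user = next(gen_user)
--         if next_user != user and next_user not in separated_users.values():
--             return next_user
--
-- def separate_players(users):
--     separated_users = dict.fromkeys(users, None)
--
--     if len(separated_users) <= 2:
--         raise ValueError("Недостаточно участников для жеребьевки")
--
--     user_generator = generator_separated_users(separated_users)
--     for user in separated_users:
--         value_user = get_user(user_generator, user, separated_users)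
--         separated_users[user] = value_user
--     return separated_users
-- ===== SOURCE B (Python) =====
-- def separate_players(users):
--     keys = list(dict.fromkeys(users))
--     if len(keys) <= 2:
--         raise ValueError("Недостаточно участников для жеребьевки")
--     n = len(keys)
--     return {keys[i]: keys[(i + 1) % n] for i in range(n)}
-- ===== Notes on version B (the rewrite author's own statement) =====
-- stated objective: simpler
-- what changed: Replaces A's infinite cyclic generator plus a per-user linear scan of already-assigned values with a closed-form rotation: each distinct user (insertion order) is mapped directly to the next one, keys[i] -> keys[(i+1) % n].
import Mathlib
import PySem

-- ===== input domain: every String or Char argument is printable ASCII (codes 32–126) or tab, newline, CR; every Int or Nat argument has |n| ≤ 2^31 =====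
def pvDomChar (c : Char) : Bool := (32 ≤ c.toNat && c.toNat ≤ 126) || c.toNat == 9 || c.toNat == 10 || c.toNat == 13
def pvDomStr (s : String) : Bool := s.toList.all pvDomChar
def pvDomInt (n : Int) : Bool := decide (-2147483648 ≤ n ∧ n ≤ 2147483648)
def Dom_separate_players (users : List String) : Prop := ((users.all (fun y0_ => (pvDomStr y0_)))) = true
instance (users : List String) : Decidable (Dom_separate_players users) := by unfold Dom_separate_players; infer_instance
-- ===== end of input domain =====

-- B replaces A's cyclic generator + repeated scan of assigned values by a closed-form
-- rotation of the deduplicated user list (simpler; same ValueError on <= 2 distinct users).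

-- ===== PORT A =====
-- generator_separated_users is modelled as a cursor `pos` into the dict's keys, cycling
-- via `% keys.length`; get_user's `while True` is a fuel recursion, `none` meaning the
-- Python loop would run forever (never reached on inputs admitted by Pre_).
def getUserA (keys : List String) (user : String) (vals : List (Option String)) :
    Nat → Nat → Option (String × Nat)
  | _, 0 => none
  | pos, fuel+1 =>
    let next_user := keys.getD (pos % keys.length) ""
    if next_user ≠ user ∧ ¬ (some next_user ∈ vals) then some (next_user, pos + 1)
    else getUserA keys user vals (pos + 1) fuel

-- the `for user in separated_users` loop, threading (dict, generator position)
def spLoopA (keys : List String) (todo : List String)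
    (st : PySem.Dict String (Option String) × Nat) :
    PySem.Dict String (Option String) × Nat :=
  match todo with
  | [] => st
  | user :: rest =>
    match getUserA keys user st.1.values st.2 (keys.length + 2) with
    | some (v, pos') => spLoopA keys rest (st.1.insert user (some v), pos')
    | none => st   -- Python's get_user would loop forever here; unreachable under Pre_

def separate_players (users : List String) : List (String × String) :=
  let keys := PySem.List.dedup users                    -- keys of dict.fromkeys(users, None)
  let d0 : PySem.Dict String (Option String) := PySem.Dict.mk (keys.map (fun k => (k, none)))
  if d0.size ≤ 2 then []                                -- raise ValueError (excluded by Pre_)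
  else
    let d := (spLoopA keys d0.keys (d0, 0)).1
    d.items.filterMap (fun p => p.2.map (fun v => (p.1, v)))

-- ===== PORT B =====
def separate_players_alt (users : List String) : List (String × String) :=
  let keys := PySem.List.dedup users
  if keys.length ≤ 2 then []                            -- raise ValueError (excluded by Pre_)
  else (List.range keys.length).map (fun i =>
    (keys.getD i "", keys.getD ((i + 1) % keys.length) ""))

-- ===== PRECONDITION & SPEC =====
-- Pre_ excludes exactly the inputs with at most 2 distinct users, on which A (and B) raise ValueError.
def Pre_separate_players (users : List String) : Prop := 2 < (PySem.List.dedup users).length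
instance (users : List String) : Decidable (Pre_separate_players users) := by
  unfold Pre_separate_players; infer_instance
def pvWitness_separate_players : List String := ["a", "b", "c"]
def Spec_separate_players (users : List String) (out : List (String × String)) : Prop :=
  out = separate_players_alt users
instance (users : List String) (out : List (String × String)) :
    Decidable (Spec_separate_players users out) := by unfold Spec_separate_players; infer_instance

-- ===== CLAIM (what is proved, stated in full; the proofs are below) =====
def Claim_equal_separate_players : Prop := ∀ (users : List String),
  Dom_separate_players users → Pre_separate_players users →
  Spec_separate_players users (separate_players users)

-- ===== LEMMAS AND PROOFS =====
-- item j of the dict once the loop has processed key j: keys[j] ↦ keys[(j+1) % n]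
def rotP (keys : List String) (j : Nat) : String × Option String :=
  (keys.getD j "", some (keys.getD ((j + 1) % keys.length) ""))

lemma rot_ne (keys : List String) (hnd : keys.Nodup)
    {a b : Nat} (ha : a < keys.length) (hb : b < keys.length) (hab : a ≠ b) :
    keys.getD a "" ≠ keys.getD b "" := by
  rw [List.getD_eq_getElem keys "" ha, List.getD_eq_getElem keys "" hb]
  exact fun h => hab ((hnd.getElem_inj_iff).mp h)

lemma succ_mod_ne (n i j : Nat) (hi : i < n) (hj : j < i) :
    (j + 1) % n ≠ (i + 1) % n := by
  rw [Nat.mod_eq_of_lt (by omega : j + 1 < n)]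
  rcases Nat.lt_or_ge (i + 1) n with h | h
  · rw [Nat.mod_eq_of_lt h]; omega
  · have : i + 1 = n := by omega
    rw [this, Nat.mod_self]; omega

lemma vals_not_mem (keys : List String) (hnd : keys.Nodup)
    (i : Nat) (hi : i < keys.length) :
    ¬ some (keys.getD ((i + 1) % keys.length) "") ∈
      (((List.range i).map (rotP keys) ++
        (keys.drop i).map (fun k => (k, (none : Option String)))).map (·.2)) := by
  intro hmem
  simp only [List.map_append, List.map_map, List.mem_append, List.mem_map, Function.comp,
    List.mem_range, rotP] at hmem
  rcases hmem with ⟨j, hj, hje⟩ | ⟨k, _, hke⟩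
  · have hje' : keys.getD ((j + 1) % keys.length) "" = keys.getD ((i + 1) % keys.length) "" := by
      simpa using hje
    exact rot_ne keys hnd (Nat.mod_lt _ (by omega)) (Nat.mod_lt _ (by omega))
      (succ_mod_ne keys.length i j hi hj) hje'
  · simp at hke

lemma cand_ne_user (keys : List String) (hnd : keys.Nodup) (hn : 2 < keys.length)
    (i : Nat) (hi : i < keys.length) :
    keys.getD ((i + 1) % keys.length) "" ≠ keys.getD i "" := by
  refine rot_ne keys hnd (Nat.mod_lt _ (by omega)) hi ?_
  rcases Nat.lt_or_ge (i + 1) keys.length with h | h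
  · rw [Nat.mod_eq_of_lt h]; omega
  · have : i + 1 = keys.length := by omega
    rw [this, Nat.mod_self]; omega

lemma getUserA_succ (keys : List String) (user : String) (vals : List (Option String))
    (pos fuel : Nat) :
    getUserA keys user vals pos (fuel + 1) =
      (let next_user := keys.getD (pos % keys.length) ""
       if next_user ≠ user ∧ ¬ (some next_user ∈ vals) then some (next_user, pos + 1)
       else getUserA keys user vals (pos + 1) fuel) := rfl

lemma spLoopA_cons_some (keys : List String) (u : String) (rest : List String)
    (st : PySem.Dict String (Option String) × Nat) (v : String) (pos' : Nat)
    (h : getUserA keys u st.1.values st.2 (keys.length + 2) = some (v, pos')) :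
    spLoopA keys (u :: rest) st = spLoopA keys rest (st.1.insert u (some v), pos') := by
  simp [spLoopA, h]

lemma map_upd_rot (keys : List String) (hnd : keys.Nodup)
    (i : Nat) (hi : i < keys.length) (v : Option String) :
    ((List.range i).map (rotP keys)).map
      (fun p => if (p.1 == keys.getD i "") = true then (keys.getD i "", v) else p)
    = (List.range i).map (rotP keys) := by
  rw [List.map_map]
  apply List.map_congr_left
  intro j hj
  simp only [List.mem_range] at hj
  simp only [Function.comp, rotP]
  rw [if_neg]
  simp only [beq_iff_eq]
  exact rot_ne keys hnd (by omega) hi (by omega)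

lemma map_upd_none (keys : List String) (hnd : keys.Nodup)
    (i : Nat) (hi : i < keys.length) (v : Option String) :
    ((keys.drop (i + 1)).map (fun k => (k, (none : Option String)))).map
      (fun p => if (p.1 == keys.getD i "") = true then (keys.getD i "", v) else p)
    = (keys.drop (i + 1)).map (fun k => (k, (none : Option String))) := by
  rw [List.map_map]
  apply List.map_congr_left
  intro k hk
  rcases List.mem_iff_getElem.mp hk with ⟨m, hm, hke⟩
  have hml : i + 1 + m < keys.length := by
    have hl : (List.drop (i + 1) keys).length = keys.length - (i + 1) := List.length_drop; omega
  have hk' : k = keys.getD (i + 1 + m) "" := by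
    rw [List.getD_eq_getElem keys "" hml, ← List.getElem_drop, hke]
    exact hm
  simp only [Function.comp]
  rw [if_neg]
  simp only [beq_iff_eq]
  rw [hk']
  exact rot_ne keys hnd hml hi (by omega)

lemma spLoopA_inv (keys : List String) (hnd : keys.Nodup) (hn : 2 < keys.length) :
    ∀ (fuel i : Nat), keys.length - i ≤ fuel → i ≤ keys.length →
    spLoopA keys (keys.drop i)
      (PySem.Dict.mk ((List.range i).map (rotP keys) ++ (keys.drop i).map (fun k => (k, none))),
       if i = 0 then 0 else i + 1)
    = (PySem.Dict.mk ((List.range keys.length).map (rotP keys)), keys.length + 1) := by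
  intro fuel
  induction fuel with
  | zero =>
    intro i hf hi
    have hieq : i = keys.length := by omega
    subst hieq
    have h0 : keys ≠ [] := by intro h; rw [h] at hn; simp at hn
    simp [spLoopA, List.drop_length, h0]
  | succ f ih =>
    intro i hf hi
    by_cases hieq : i = keys.length
    · subst hieq
      have h0 : keys ≠ [] := by intro h; rw [h] at hn; simp at hn
      simp [spLoopA, List.drop_length, h0]
    · have hil : i < keys.length := by omega
      have hdrop : keys.drop i = keys.getD i "" :: keys.drop (i + 1) := by
        rw [List.getD_eq_getElem keys "" hil]
        exact (List.getElem_cons_drop hil).symm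
      have hcand := cand_ne_user keys hnd hn i hil
      have hnm := vals_not_mem keys hnd i hil
      -- evaluate get_user: one generator step for i ≥ 1, two for i = 0
      have hget : getUserA keys (keys.getD i "")
          (((List.range i).map (rotP keys) ++
            (keys.drop i).map (fun k => (k, (none : Option String)))).map (·.2))
          (if i = 0 then 0 else i + 1) (keys.length + 2)
          = some (keys.getD ((i + 1) % keys.length) "", i + 2) := by
        by_cases hi0 : i = 0
        · subst hi0
          rw [if_pos rfl, show keys.length + 2 = (keys.length + 1) + 1 from rfl, getUserA_succ]
          simp only []
          rw [if_neg (by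
            intro h
            exact h.1 (by simp [Nat.zero_mod]))]
          rw [getUserA_succ]
          simp only []
          rw [if_pos ⟨hcand, hnm⟩]
        · rw [if_neg hi0, show keys.length + 2 = (keys.length + 1) + 1 from rfl, getUserA_succ]
          simp only []
          rw [if_pos ⟨hcand, hnm⟩]
      rw [hdrop] at hget hnm ⊢
      rw [spLoopA_cons_some keys _ _ _ _ _ (by rw [PySem.Dict.values_mk]; exact hget)]
      simp only [List.map_cons]
      -- the insert rewrites exactly the slot of keys[i]
      have hins : (PySem.Dict.mk ((List.range i).map (rotP keys) ++
            (keys.getD i "", (none : Option String)) :: (keys.drop (i + 1)).map (fun k => (k, none)))).insert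
            (keys.getD i "") (some (keys.getD ((i + 1) % keys.length) ""))
          = PySem.Dict.mk ((List.range (i + 1)).map (rotP keys) ++
            (keys.drop (i + 1)).map (fun k => (k, none))) := by
        apply PySem.Dict.ext
        rw [PySem.Dict.items_insert_of_contains _ _ (by
          rw [PySem.Dict.contains_mk]
          exact List.any_eq_true.mpr ⟨(keys.getD i "", none), by simp, by simp⟩)]
        show List.map _ ((List.range i).map (rotP keys) ++
          (keys.getD i "", (none : Option String)) :: (keys.drop (i + 1)).map (fun k => (k, none))) = _
        rw [List.map_append, List.map_cons, map_upd_rot keys hnd i hil, map_upd_none keys hnd i hil]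
        show (List.range i).map (rotP keys) ++
            (if (keys.getD i "" == keys.getD i "") = true then _ else _) :: _ = _
        rw [if_pos (by simp)]
        rw [List.range_succ, List.map_append, List.append_assoc]
        rfl
      rw [hins]
      have := ih (i + 1) (by omega) (by omega)
      rw [if_neg (by omega)] at this
      exact this

theorem separate_players_spec : Claim_equal_separate_players := by
  intro users _ hpre
  have hn : 2 < (PySem.List.dedup users).length := hpre
  have hnd : (PySem.List.dedup users).Nodup := PySem.List.nodup_dedup users
  unfold Spec_separate_players separate_players separate_players_alt
  dsimp only []
  set keys := PySem.List.dedup users with hk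
  have hsize : (PySem.Dict.mk (keys.map (fun k => (k, (none : Option String))))).size
      = keys.length := by
    simp [PySem.Dict.size]
  rw [hsize, if_neg (by omega), if_neg (by omega)]
  have hkeys : (PySem.Dict.mk (keys.map (fun k => (k, (none : Option String))))).keys = keys := by
    simp only [PySem.Dict.keys, List.map_map, Function.comp_def]
    exact List.map_id keys
  rw [hkeys]
  have hloop := spLoopA_inv keys hnd hn keys.length 0 (by omega) (by omega)
  simp only [List.drop_zero, List.range_zero, List.map_nil, List.nil_append,
    if_true] at hloop
  rw [hloop]
  simp [rotP, List.filterMap_map, Function.comp]
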